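-- pv_equiv track=rewrite | github.com/ulf1/sparsity-pattern | sparsity_pattern/generators.py | blockflex
-- ===== SOURCE A (Python) =====
-- from typing import List
--
-- def blockflex(n: int, block_sizes=List[int]) -> List[List[int]]:
--     """Block Diagonal Matrix with different sized blocks
--
--     Args:
--         n (int): Dimension of quadratic matrix
--         block_sizes (List[int], int): The block size. Different
--             block sizes as list possible that will be repeated,
--             e.g., `block_sizes=[2,3]`
--
--     Returns:
--         List[List[int]]: Sparsity pattern as list of row/column-pairs
--             or -keys (dictionary of keys format)
--     """
--     if isinstance(block_sizes, int):
--         block_sizes = [block_sizes]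
--     arr = []
--     flag = True
--     i = 0
--     n_blocks = len(block_sizes)
--     idx_block_end = 0
--     # loop over blocks
--     while flag:
--         # get the start index of the next block
--         h = i % n_blocks
--         idx_block_start = idx_block_end
--         idx_block_end = min(n, idx_block_start + block_sizes[h])
--         indices = range(idx_block_start, idx_block_end)
--         # enumerate all index pairs
--         arr.extend([(j, k) for k in indices for j in indices])
--         # set flag to false
--         if idx_block_end >= n:
--             flag = False
--         i += 1
--     return arr
-- ===== SOURCE B (Python) =====
-- def blockflex(n, block_sizes):
--     if isinstance(block_sizes, int):
--         block_sizes = [block_sizes]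
--     out = []
--     i = 0
--     lo = 0
--     hi = min(n, block_sizes[0])
--     # single pass over the matrix indices k, sliding the current block window
--     for k in range(n):
--         while k >= hi:
--             i += 1
--             lo = hi
--             hi = min(n, hi + block_sizes[i % len(block_sizes)])
--         for j in range(lo, hi):
--             out.append((j, k))
--     return out
-- ===== Notes on version B (the rewrite author's own statement) =====
-- stated objective: alternative
-- what changed: B replaces A's per-block state machine (emit a whole block's pair square per loop iteration) by a single pass over the matrix indices k=0..n-1 that slides a current-block window [lo,hi) and emits that k's row pairs; Pre_ excludes negative block sizes (for n>0, plus all-zero totals on which A loops forever) and, for n<=0, first sizes below n: sizes are naturally nonnegative, and there A's clipped block end moves backwards so it re-emits out-of-matrix or overlapping pairs.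
-- outside the precondition, e.g. on blockflex(-1, [-3, 5]): A returns [(-3, -3), (-2, -3), (-3, -2), (-2, -2)], B returns []
import Mathlib
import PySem

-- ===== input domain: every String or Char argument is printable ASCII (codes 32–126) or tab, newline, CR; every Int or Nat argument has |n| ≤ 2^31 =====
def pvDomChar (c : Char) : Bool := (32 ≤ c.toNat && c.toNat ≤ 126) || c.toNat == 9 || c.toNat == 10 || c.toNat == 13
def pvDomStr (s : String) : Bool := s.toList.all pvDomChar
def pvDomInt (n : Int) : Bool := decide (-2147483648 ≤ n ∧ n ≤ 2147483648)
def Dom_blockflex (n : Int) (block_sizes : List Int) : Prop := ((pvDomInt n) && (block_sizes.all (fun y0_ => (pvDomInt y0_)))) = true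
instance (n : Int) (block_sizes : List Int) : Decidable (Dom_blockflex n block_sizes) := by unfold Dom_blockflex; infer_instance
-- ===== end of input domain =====

-- B replaces A's per-block emission loop by a single pass over the matrix
-- indices k = 0..n-1 that slides a current-block window; objective: alternative.

-- ===== PORT A =====
-- A's 'while flag' loop, fuel-guarded; fuel (n.toNat+2)*(len+1) suffices on
-- Pre_ (nonnegative sizes with positive total raise the running end each cycle).
-- bs.getD h 0: Python bs[h] with h = i % len(bs) always in range when bs ≠ [].
def blockflexLoop (n : Int) (bs : List Int) : Nat → Nat → Int → List (Int × Int) → List (Int × Int)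
  | 0, _, _, arr => arr
  | fuel+1, i, idx_block_end, arr =>
    let h := i % bs.length
    let idx_block_start := idx_block_end
    let idx_block_end' := min n (idx_block_start + bs.getD h 0)
    let indices := PySem.List.pyRange idx_block_start idx_block_end' 1
    let arr' := arr ++ indices.flatMap (fun k => indices.map (fun j => (j, k)))
    if idx_block_end' ≥ n then arr' else blockflexLoop n bs fuel (i+1) idx_block_end' arr'

def blockflex (n : Int) (block_sizes : List Int) : List (Int × Int) :=
  blockflexLoop n block_sizes ((n.toNat + 2) * (block_sizes.length + 1)) 0 0 []

-- ===== PORT B =====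
-- Source B's inner 'while k >= hi' advancing the block window; fuel-guarded
-- with the same fuel bound, sufficient on Pre_.
def altInner (n : Int) (bs : List Int) (k : Int) : Nat → Nat × Int × Int → Nat × Int × Int
  | 0, st => st
  | fuel+1, (i, lo, hi) =>
    if k ≥ hi then
      altInner n bs k fuel (i+1, hi, min n (hi + bs.getD ((i+1) % bs.length) 0))
    else (i, lo, hi)

-- one iteration of Source B's 'for k in range(n)' loop body
def altStep (n : Int) (bs : List Int) (F : Nat)
    (st : (Nat × Int × Int) × List (Int × Int)) (k : Int) : (Nat × Int × Int) × List (Int × Int) :=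
  let s := altInner n bs k F st.1
  (s, st.2 ++ (PySem.List.pyRange s.2.1 s.2.2 1).map (fun j => (j, k)))

def blockflex_alt (n : Int) (block_sizes : List Int) : List (Int × Int) :=
  ((PySem.List.pyRange 0 n 1).foldl
    (altStep n block_sizes ((n.toNat + 2) * (block_sizes.length + 1)))
    ((0, 0, min n (block_sizes.getD 0 0)), [])).2

-- ===== PRECONDITION & SPEC =====
-- For n > 0, Pre_ excludes negative block sizes, which lie outside the natural
-- domain of sizes and make A's clipped block end move backwards so it re-emits
-- overlapping pairs, and nonpositive-total size lists on which A loops forever;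
-- for n ≤ 0 it excludes first sizes below n (same backward-end quirk of A);
-- the empty list raises ZeroDivisionError in A.
def Pre_blockflex (n : Int) (block_sizes : List Int) : Prop :=
  block_sizes ≠ [] ∧
    ((0 < n ∧ (∀ b ∈ block_sizes, 0 ≤ b) ∧ 0 < block_sizes.sum) ∨
      (n ≤ 0 ∧ n ≤ block_sizes.headD 0))
instance (n : Int) (block_sizes : List Int) : Decidable (Pre_blockflex n block_sizes) := by
  unfold Pre_blockflex; infer_instance

def pvWitness_blockflex : Int × List Int := (3, [2, 1])

def Spec_blockflex (n : Int) (block_sizes : List Int) (out : List (Int × Int)) : Prop := out = blockflex_alt n block_sizes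
instance (n : Int) (block_sizes : List Int) (out : List (Int × Int)) : Decidable (Spec_blockflex n block_sizes out) := by unfold Spec_blockflex; infer_instance

-- ===== CLAIM =====
def Claim_equal_blockflex : Prop := ∀ (n : Int) (block_sizes : List Int), Dom_blockflex n block_sizes → Pre_blockflex n block_sizes → Spec_blockflex n block_sizes (blockflex n block_sizes)

-- ===== LEMMAS AND PROOFS =====

-- pairs of one block [a,b)
def pvPairs (a b : Int) : List (Int × Int) :=
  (PySem.List.pyRange a b 1).flatMap (fun k => (PySem.List.pyRange a b 1).map (fun j => (j, k)))

-- A's loop with the accumulator pulled out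
def pvBlocks (n : Int) (bs : List Int) : Nat → Nat → Int → List (Int × Int)
  | 0, _, _ => []
  | fuel+1, i, start =>
    let e := min n (start + bs.getD (i % bs.length) 0)
    pvPairs start e ++ (if e ≥ n then [] else pvBlocks n bs fuel (i+1) e)

-- the chain of block boundaries from a given start
def pvBoundsFrom (n : Int) (bs : List Int) : Nat → Nat → Int → List Int
  | 0, _, _ => []
  | fuel+1, i, start =>
    if start < n then
      let e := min n (start + bs.getD (i % bs.length) 0)
      e :: pvBoundsFrom n bs fuel (i+1) e
    else []

def pvPairsOf (l : List Int) : List (Int × Int) :=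
  (l.zip l.tail).flatMap (fun ab => pvPairs ab.1 ab.2)

theorem pvLoopA_eq (n : Int) (bs : List Int) :
    ∀ (fuel i : Nat) (start : Int) (arr : List (Int × Int)),
      blockflexLoop n bs fuel i start arr = arr ++ pvBlocks n bs fuel i start := by
  intro fuel
  induction fuel with
  | zero => intro i start arr; simp [blockflexLoop, pvBlocks]
  | succ f ih =>
    intro i start arr
    simp only [blockflexLoop, pvBlocks, pvPairs]
    split
    · simp
    · rw [ih]
      simp

theorem pvBoundsFrom_stop (n : Int) (bs : List Int) (fuel i : Nat) (start : Int)
    (h : ¬ start < n) : pvBoundsFrom n bs fuel i start = [] := by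
  cases fuel <;> simp [pvBoundsFrom, h]

theorem pvPairsOf_cons_cons (a b : Int) (t : List Int) :
    pvPairsOf (a :: b :: t) = pvPairs a b ++ pvPairsOf (b :: t) := by
  simp [pvPairsOf]

theorem pvMain (n : Int) (bs : List Int) :
    ∀ (fuel i : Nat) (start : Int), start < n →
      pvBlocks n bs fuel i start = pvPairsOf (start :: pvBoundsFrom n bs fuel i start) := by
  intro fuel
  induction fuel with
  | zero => intro i start _; simp [pvBlocks, pvBoundsFrom, pvPairsOf]
  | succ f ih =>
    intro i start hlt
    set e := min n (start + bs.getD (i % bs.length) 0) with he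
    simp only [pvBlocks, pvBoundsFrom, if_pos hlt, ← he]
    rw [pvPairsOf_cons_cons]
    by_cases hge : e ≥ n
    · rw [if_pos hge, pvBoundsFrom_stop n bs f (i+1) e (by omega)]
      simp [pvPairsOf]
    · rw [if_neg hge, ih (i+1) e (by omega)]

theorem pvRange_nil (a b : Int) (h : b ≤ a) : PySem.List.pyRange a b 1 = [] := by
  rw [PySem.List.pyRange_one]
  have : (b - a).toNat = 0 := by omega
  simp [this]

-- cyclic running sum of the block sizes: t terms starting at index i
def pvCycN (bs : List Int) (i t : Nat) : Int :=
  ((List.range t).map (fun u => bs.getD ((i+u) % bs.length) 0)).sum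

theorem pvCycN_add (bs : List Int) (i a b : Nat) :
    pvCycN bs i (a+b) = pvCycN bs i a + pvCycN bs (i+a) b := by
  unfold pvCycN
  rw [List.range_add]
  simp only [List.map_append, List.sum_append, List.map_map]
  congr 2
  apply List.map_congr_left
  intro u _
  simp only [Function.comp_apply]
  congr 2
  omega

theorem pvSum_range_getD (l : List Int) :
    ∀ (j : Nat), j ≤ l.length →
      ((List.range j).map (fun u => l.getD u 0)).sum = (l.take j).sum := by
  intro j
  induction j with
  | zero => simp
  | succ j ih =>
    intro hj
    have hjl : j < l.length := by omega
    rw [List.range_succ, List.take_add_one]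
    simp only [List.map_append, List.sum_append, List.map_cons, List.map_nil,
      List.sum_cons, List.sum_nil, ih (by omega)]
    simp [List.getD_eq_getElem?_getD, List.getElem?_eq_getElem hjl]

theorem pvCycle_shift (bs : List Int) (hbs : bs ≠ []) (i : Nat) :
    pvCycN bs (i+1) bs.length = pvCycN bs i bs.length := by
  obtain ⟨m, hm⟩ : ∃ m, bs.length = m + 1 :=
    ⟨bs.length - 1, by have := List.length_pos_iff.mpr hbs; omega⟩
  unfold pvCycN
  rw [hm]
  conv_lhs => rw [List.range_succ]
  conv_rhs => rw [List.range_succ_eq_map]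
  simp only [List.map_append, List.sum_append, List.map_cons, List.sum_cons,
    List.map_map, List.map_nil, List.sum_nil]
  have h1 : (i + 1 + m) % (m + 1) = i % (m + 1) := by
    have : i + 1 + m = i + (m + 1) := by omega
    rw [this, Nat.add_mod_right]
  rw [h1]
  rw [Nat.add_zero]
  have h2 : ((List.range m).map (fun u => bs.getD ((i + 1 + u) % (m+1)) 0)).sum
      = ((List.range m).map ((fun u => bs.getD ((i + u) % (m+1)) 0) ∘ Nat.succ)).sum := by
    congr 1
    apply List.map_congr_left
    intro u _
    simp only [Function.comp_apply]
    congr 2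
    omega
  rw [h2]
  ring_nf

theorem pvCycle_sum (bs : List Int) (hbs : bs ≠ []) :
    ∀ i, pvCycN bs i bs.length = bs.sum := by
  intro i
  induction i with
  | zero =>
    unfold pvCycN
    have h : ((List.range bs.length).map (fun u => bs.getD ((0+u) % bs.length) 0)).sum
        = ((List.range bs.length).map (fun u => bs.getD u 0)).sum := by
      congr 1
      apply List.map_congr_left
      intro u hu
      rw [List.mem_range] at hu
      congr 1
      rw [Nat.zero_add, Nat.mod_eq_of_lt hu]
    rw [h, pvSum_range_getD bs bs.length le_rfl, List.take_length]
  | succ i ih => rw [pvCycle_shift bs hbs i, ih]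

theorem pvCycN_mul (bs : List Int) (hbs : bs ≠ []) :
    ∀ (m i : Nat), pvCycN bs i (m * bs.length) = (m : Int) * bs.sum := by
  intro m
  induction m with
  | zero => intro i; simp [pvCycN]
  | succ m ih =>
    intro i
    have h : (m+1) * bs.length = bs.length + m * bs.length := by ring
    rw [h, pvCycN_add, pvCycle_sum bs hbs, ih]
    push_cast
    ring

theorem pvReachN (n : Int) (bs : List Int) :
    ∀ (fuel i : Nat) (start : Int), start < n →
      (∃ t, t < fuel ∧ n ≤ start + pvCycN bs i (t+1)) →
      ∃ y ∈ pvBoundsFrom n bs fuel i start, n ≤ y := by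
  intro fuel
  induction fuel with
  | zero => rintro i start _ ⟨t, ht, _⟩; omega
  | succ f ih =>
    rintro i start hlt ⟨t, ht, hge⟩
    set e := min n (start + bs.getD (i % bs.length) 0) with he
    simp only [pvBoundsFrom, if_pos hlt, ← he]
    by_cases hen : n ≤ e
    · exact ⟨e, List.mem_cons_self, hen⟩
    · have hchoice := min_choice n (start + bs.getD (i % bs.length) 0)
      rw [← he] at hchoice
      have heq : e = start + bs.getD (i % bs.length) 0 := by
        rcases hchoice with h | h
        · omega
        · exact h
      have hcyc1 : pvCycN bs i 1 = bs.getD (i % bs.length) 0 := by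
        simp [pvCycN]
      cases t with
      | zero =>
        exfalso
        rw [hcyc1] at hge
        omega
      | succ t' =>
        have hsplit : pvCycN bs i (t'+1+1) = bs.getD (i % bs.length) 0 + pvCycN bs (i+1) (t'+1) := by
          have h1 : t'+1+1 = 1 + (t'+1) := by omega
          rw [h1, pvCycN_add, hcyc1]
        rw [hsplit] at hge
        obtain ⟨y, hy, hny⟩ := ih (i+1) e (by omega) ⟨t', by omega, by omega⟩
        exact ⟨y, List.mem_cons_of_mem _ hy, hny⟩

-- inner loop: no-op when k is inside the current block
theorem pvInner_noop (n : Int) (bs : List Int) (k : Int) (F : Nat) (i : Nat) (lo hi : Int)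
    (h : k < hi) : altInner n bs k F (i, lo, hi) = (i, lo, hi) := by
  cases F with
  | zero => rfl
  | succ F => simp only [altInner, if_neg (by omega : ¬ k ≥ hi)]

-- inner loop: one more unit of fuel does not change a terminated result
theorem pvInner_succ (n : Int) (bs : List Int) (k : Int) :
    ∀ (F : Nat) (st : Nat × Int × Int), k < (altInner n bs k F st).2.2 →
      altInner n bs k (F+1) st = altInner n bs k F st := by
  intro F
  induction F with
  | zero =>
    rintro ⟨i, lo, hi⟩ h
    simp only [altInner] at h ⊢
    rw [if_neg (by omega : ¬ k ≥ hi)]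
  | succ F ih =>
    rintro ⟨i, lo, hi⟩ h
    by_cases hk : k ≥ hi
    · simp only [altInner, if_pos hk] at h ⊢
      exact ih _ h
    · simp only [altInner, if_neg hk]

theorem pvInner_mono (n : Int) (bs : List Int) (k : Int) (F F' : Nat) (st : Nat × Int × Int)
    (hle : F ≤ F') (h : k < (altInner n bs k F st).2.2) :
    altInner n bs k F' st = altInner n bs k F st := by
  induction F' with
  | zero =>
    have : F = 0 := by omega
    rw [this]
  | succ F' ih =>
    rcases Nat.eq_or_lt_of_le hle with heq | hlt
    · rw [heq]
    · have h1 := ih (by omega)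
      rw [pvInner_succ n bs k F' st (by rw [h1]; exact h), h1]

-- inner loop terminates within fuel ≥ length of the remaining bounds chain
theorem pvInner_term (n : Int) (bs : List Int) (k : Int) :
    ∀ (fblk F : Nat) (i : Nat) (lo hi : Int), fblk ≤ F →
      hi = min n (lo + bs.getD (i % bs.length) 0) →
      (n ≤ hi ∨ ∃ y ∈ pvBoundsFrom n bs fblk (i+1) hi, n ≤ y) →
      k < n →
      k < (altInner n bs k F (i, lo, hi)).2.2 := by
  intro fblk
  induction fblk with
  | zero =>
    intro F i lo hi _ _ hterm hk
    rcases hterm with h | h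
    · rw [pvInner_noop n bs k F i lo hi (by omega)]
      show k < hi
      omega
    · simp [pvBoundsFrom] at h
  | succ f ih =>
    intro F i lo hi hF hinv hterm hk
    by_cases hkh : k < hi
    · rw [pvInner_noop n bs k F i lo hi hkh]; exact hkh
    · have hhin : hi < n := by omega
      obtain ⟨F₀, rfl⟩ : ∃ F₀, F = F₀ + 1 := ⟨F - 1, by omega⟩
      simp only [altInner, if_pos (by omega : k ≥ hi)]
      set e := min n (hi + bs.getD ((i+1) % bs.length) 0) with he
      apply ih F₀ (i+1) hi e (by omega) he
      · have hb : pvBoundsFrom n bs (f+1) (i+1) hi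
            = e :: pvBoundsFrom n bs f (i+2) e := by
          simp only [pvBoundsFrom, if_pos hhin, ← he]
        rcases hterm with h | ⟨y, hy, hny⟩
        · omega
        · rw [hb] at hy
          rcases List.mem_cons.mp hy with rfl | hy'
          · exact Or.inl hny
          · exact Or.inr ⟨y, hy', hny⟩
      · exact hk

-- the k-pass is constant on the current block: consume [s, hi)
theorem pvA1 (n : Int) (bs : List Int) (F : Nat) :
    ∀ (m : Nat) (i : Nat) (lo hi s : Int) (acc : List (Int × Int)),
      s ≤ hi → hi ≤ n → (hi - s).toNat = m →
      (PySem.List.pyRange s n 1).foldl (altStep n bs F) ((i, lo, hi), acc)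
        = (PySem.List.pyRange hi n 1).foldl (altStep n bs F)
            ((i, lo, hi), acc ++ (PySem.List.pyRange s hi 1).flatMap
              (fun k => (PySem.List.pyRange lo hi 1).map (fun j => (j, k)))) := by
  intro m
  induction m with
  | zero =>
    intro i lo hi s acc hsh _ hm
    have hs : s = hi := by omega
    subst hs
    rw [pvRange_nil s s le_rfl]
    simp
  | succ m ih =>
    intro i lo hi s acc hsh hhn hm
    have hslt : s < hi := by omega
    rw [PySem.List.pyRange_one_cons (by omega : s < n), List.foldl_cons]
    have hstep : altStep n bs F ((i, lo, hi), acc) s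
        = ((i, lo, hi), acc ++ (PySem.List.pyRange lo hi 1).map (fun j => (j, s))) := by
      simp only [altStep, pvInner_noop n bs s F i lo hi hslt]
    rw [hstep, ih i lo hi (s+1) _ (by omega) hhn (by omega)]
    rw [PySem.List.pyRange_one_cons hslt]
    simp

-- main B lemma: the k-pass from s with current block (i, lo, hi) produces the
-- remaining rows of the current block followed by the later blocks' squares
theorem pvBMain (n : Int) (bs : List Int) (hbs : bs ≠ []) (hnn : ∀ b ∈ bs, 0 ≤ b) (F : Nat) :
    ∀ (fblk : Nat) (i : Nat) (lo hi s : Int) (acc : List (Int × Int)),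
      fblk ≤ F →
      hi = min n (lo + bs.getD (i % bs.length) 0) →
      s ≤ hi →
      (n ≤ hi ∨ ∃ y ∈ pvBoundsFrom n bs fblk (i+1) hi, n ≤ y) →
      ((PySem.List.pyRange s n 1).foldl (altStep n bs F) ((i, lo, hi), acc)).2
        = acc ++ (PySem.List.pyRange s hi 1).flatMap
              (fun k => (PySem.List.pyRange lo hi 1).map (fun j => (j, k)))
            ++ pvPairsOf (hi :: pvBoundsFrom n bs fblk (i+1) hi) := by
  intro fblk
  induction fblk with
  | zero =>
    intro i lo hi s acc _ hinv hsh hterm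
    have hn : n ≤ hi := by
      rcases hterm with h | h
      · exact h
      · simp [pvBoundsFrom] at h
    have hhn : hi ≤ n := by rw [hinv]; exact min_le_left _ _
    rw [pvA1 n bs F (hi - s).toNat i lo hi s acc hsh hhn rfl]
    rw [pvRange_nil hi n hn]
    simp [pvBoundsFrom, pvPairsOf]
  | succ f ih =>
    intro i lo hi s acc hF hinv hsh hterm
    have hhn : hi ≤ n := by rw [hinv]; exact min_le_left _ _
    rw [pvA1 n bs F (hi - s).toNat i lo hi s acc hsh hhn rfl]
    by_cases hn : n ≤ hi
    · rw [pvRange_nil hi n hn, List.foldl_nil]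
      rw [pvBoundsFrom_stop n bs (f+1) (i+1) hi (by omega)]
      simp [pvPairsOf]
    · -- hi < n: advance to the next block
      set e := min n (hi + bs.getD ((i+1) % bs.length) 0) with he
      have hbnds : pvBoundsFrom n bs (f+1) (i+1) hi = e :: pvBoundsFrom n bs f (i+2) e := by
        simp only [pvBoundsFrom, if_pos (by omega : hi < n), ← he]
      have hterm' : n ≤ e ∨ ∃ y ∈ pvBoundsFrom n bs f (i+2) e, n ≤ y := by
        rcases hterm with h | ⟨y, hy, hny⟩
        · omega
        · rw [hbnds] at hy
          rcases List.mem_cons.mp hy with rfl | hy'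
          · exact Or.inl hny
          · exact Or.inr ⟨y, hy', hny⟩
      have hsize : 0 ≤ bs.getD ((i+1) % bs.length) 0 := by
        have hlt : (i+1) % bs.length < bs.length :=
          Nat.mod_lt _ (List.length_pos_iff.mpr hbs)
        rw [List.getD_eq_getElem?_getD, List.getElem?_eq_getElem hlt]
        exact hnn _ (List.getElem_mem hlt)
      have hhe : hi ≤ e := by omega
      obtain ⟨F₀, rfl⟩ : ∃ F₀, F = F₀ + 1 := ⟨F - 1, by omega⟩
      -- the first k = hi: the inner loop advances the window to (i+1, hi, e)
      have hkterm := pvInner_term n bs hi f F₀ (i+1) hi e (by omega) he hterm' (by omega)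
      have hinner : altInner n bs hi (F₀+1) (i, lo, hi) = altInner n bs hi (F₀+1) (i+1, hi, e) := by
        have h1 : altInner n bs hi (F₀+1) (i, lo, hi) = altInner n bs hi F₀ (i+1, hi, e) := by
          simp only [altInner, if_pos (le_refl hi), ← he]
        rw [h1, pvInner_mono n bs hi F₀ (F₀+1) (i+1, hi, e) (by omega) hkterm]
      rw [PySem.List.pyRange_one_cons (by omega : hi < n), List.foldl_cons]
      have hstep : altStep n bs (F₀+1) ((i, lo, hi), acc ++ (PySem.List.pyRange s hi 1).flatMap
            (fun k => (PySem.List.pyRange lo hi 1).map (fun j => (j, k)))) hi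
          = altStep n bs (F₀+1) ((i+1, hi, e), acc ++ (PySem.List.pyRange s hi 1).flatMap
            (fun k => (PySem.List.pyRange lo hi 1).map (fun j => (j, k)))) hi := by
        simp only [altStep, hinner]
      have hih := ih (i+1) hi e hi (acc ++ (PySem.List.pyRange s hi 1).flatMap
            (fun k => (PySem.List.pyRange lo hi 1).map (fun j => (j, k)))) (by omega) he hhe hterm'
      rw [PySem.List.pyRange_one_cons (by omega : hi < n), List.foldl_cons] at hih
      rw [hstep, hih, hbnds, pvPairsOf_cons_cons]
      simp [pvPairs]

-- ===== VERDICT =====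
theorem blockflex_spec : Claim_equal_blockflex := by
  intro n bs _ hpre
  obtain ⟨hne, hcase⟩ := hpre
  unfold Spec_blockflex blockflex blockflex_alt
  have hL : 0 < bs.length := List.length_pos_iff.mpr hne
  rcases hcase with ⟨hn, hnn, hsum0⟩ | ⟨hn, hhd⟩
  · -- positive dimension
    have hhead : 0 ≤ bs.getD 0 0 := by
      rw [List.getD_eq_getElem?_getD, List.getElem?_eq_getElem hL]
      exact hnn _ (List.getElem_mem hL)
    set F := (n.toNat + 2) * (bs.length + 1) with hF
    have hF1 : 1 ≤ F := by
      have : (n.toNat + 2) * (bs.length + 1) = n.toNat * bs.length + n.toNat + 2 * bs.length + 2 := by ring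
      omega
    obtain ⟨F', hF'⟩ : ∃ F', F = F' + 1 := ⟨F - 1, by omega⟩
    set hi := min n (bs.getD 0 0) with hhi0
    have hinv : hi = min n (0 + bs.getD (0 % bs.length) 0) := by
      rw [hhi0, Nat.zero_mod, zero_add]
    -- A = pvPairsOf (0 :: hi :: rest)
    rw [pvLoopA_eq, List.nil_append, pvMain n bs F 0 0 hn]
    have hbnds : pvBoundsFrom n bs F 0 0 = hi :: pvBoundsFrom n bs F' 1 hi := by
      rw [hF']
      simp only [pvBoundsFrom, if_pos hn, ← hinv]
    -- termination witness for the chain after the first block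
    have hterm : n ≤ hi ∨ ∃ y ∈ pvBoundsFrom n bs F' 1 hi, n ≤ y := by
      by_cases hhin : n ≤ hi
      · exact Or.inl hhin
      · right
        have hsum : 0 < bs.sum := hsum0
        apply pvReachN n bs F' 1 hi (by omega)
        refine ⟨n.toNat * bs.length - 1, ?_, ?_⟩
        · have hexp : (n.toNat + 2) * (bs.length + 1)
              = n.toNat * bs.length + n.toNat + 2 * bs.length + 2 := by ring
          omega
        · have ht1 : n.toNat * bs.length - 1 + 1 = n.toNat * bs.length := by
            have : 1 ≤ n.toNat * bs.length := by
              have h1 : 1 ≤ n.toNat := by omega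
              calc 1 = 1 * 1 := by ring
                _ ≤ n.toNat * bs.length := Nat.mul_le_mul h1 hL
            omega
          rw [ht1, pvCycN_mul bs hne n.toNat 1]
          have hge : (n.toNat : Int) ≤ (n.toNat : Int) * bs.sum :=
            le_mul_of_one_le_right (by positivity) (by omega)
          have hhi0' : 0 ≤ hi := by
            rw [hhi0]; omega
          omega
    -- B via the main lemma
    rw [pvBMain n bs hne hnn F F' 0 0 hi 0 [] (by omega) hinv
        (by rw [hhi0]; omega) hterm]
    rw [hbnds, pvPairsOf_cons_cons]
    simp [pvPairs]
  · -- n ≤ 0 with n ≤ first size: both sides are empty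
    have hhead : n ≤ bs.getD 0 0 := by
      obtain ⟨x, t, rfl⟩ := List.exists_cons_of_ne_nil hne
      simpa using hhd
    rw [pvRange_nil 0 n (by omega), List.foldl_nil]
    rw [pvLoopA_eq, List.nil_append]
    obtain ⟨f, hf⟩ := Nat.exists_eq_succ_of_ne_zero
      (Nat.mul_ne_zero (by omega) (by omega) : (n.toNat + 2) * (bs.length + 1) ≠ 0)
    rw [hf]
    have he : min n (0 + bs.getD (0 % bs.length) 0) = n := by
      rw [Nat.zero_mod, zero_add]
      omega
    simp only [pvBlocks, he]
    rw [if_pos (le_refl n)]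
    simp [pvPairs, pvRange_nil 0 n (by omega)]
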